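-- pv_equiv track=rewrite | github.com/michaelcdippenaar/property_manager | backend/apps/properties/gap_analysis.py | _norm_type
-- ===== SOURCE A (Python) =====
-- def _norm_type(raw: str | None) -> str:
--     if not raw:
--         return ""
--     s = raw.strip().lower()
--     for ch in (".", "-", " ", "/"):
--         s = s.replace(ch, "_")
--     while "__" in s:
--         s = s.replace("__", "_")
--     return s.strip("_")
-- ===== SOURCE B (Python) =====
-- def _norm_type(raw):
--     if not raw:
--         return ""
--     seps = {".", "-", " ", "/", "_"}
--     parts = []
--     cur = []
--     for ch in raw.strip().lower():
--         if ch in seps: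
--             if cur:
--                 parts.append("".join(cur))
--                 cur = []
--         else:
--             cur.append(ch)
--     if cur:
--         parts.append("".join(cur))
--     return "_".join(parts)
-- ===== Notes on version B (the rewrite author's own statement) =====
-- stated objective: alternative
-- what changed: Replaces the per-character replace passes, the repeated double-underscore collapse loop and the final underscore strip by a single left-to-right tokenizer that accumulates maximal runs of non-separator characters and joins them with an underscore.
import Mathlib
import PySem

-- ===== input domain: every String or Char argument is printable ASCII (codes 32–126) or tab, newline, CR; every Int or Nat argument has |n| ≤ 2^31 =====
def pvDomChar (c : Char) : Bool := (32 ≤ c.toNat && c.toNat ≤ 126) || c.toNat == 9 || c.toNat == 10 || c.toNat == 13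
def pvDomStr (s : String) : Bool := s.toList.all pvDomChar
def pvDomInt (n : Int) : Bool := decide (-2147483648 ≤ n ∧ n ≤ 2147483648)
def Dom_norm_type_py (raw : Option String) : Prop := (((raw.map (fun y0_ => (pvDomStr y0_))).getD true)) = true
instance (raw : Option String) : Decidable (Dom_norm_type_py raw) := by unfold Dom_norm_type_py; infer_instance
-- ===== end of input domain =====

-- B replaces A's per-character replace passes, the repeated double-underscore
-- collapse while loop and the final underscore strip by a single left-to-right
-- tokenizer (maximal runs of non-separator characters) joined with underscores
-- (objective: alternative decomposition).

-- ===== PORT A =====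
-- Proof-side normal form of one s.replace("__","_") pass; used only to justify
-- termination of the while-loop port (each iteration strictly shortens the string).
def repDD : List Char → List Char
  | [] => []
  | [c] => [c]
  | a :: b :: t => if a = '_' ∧ b = '_' then '_' :: repDD t else a :: repDD (b :: t)

theorem go_dd (fuel : Nat) (l acc : List Char) (h : l.length ≤ fuel) :
    PySem.Chars.replace.go ['_', '_'] ['_'] fuel l acc = acc.reverse ++ repDD l := by
  induction fuel generalizing l acc with
  | zero =>
    cases l with
    | nil => rw [PySem.Chars.replace.go]; simp [repDD]
    | cons c t => simp at h
  | succ f ih =>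
    cases l with
    | nil =>
      rw [PySem.Chars.replace.go]
      · simp [repDD]
      · omega
    | cons c t =>
      rw [PySem.Chars.replace.go]
      cases t with
      | nil =>
        have hpre : (['_', '_'] : List Char).isPrefixOf [c] = false := by
          simp [List.isPrefixOf]
        simp only [hpre, Bool.false_eq_true, if_false]
        rw [ih [] (c :: acc) (by simp)]
        simp [repDD]
      | cons b t2 =>
        by_cases hc : c = '_' ∧ b = '_'
        · obtain ⟨rfl, rfl⟩ := hc
          have hpre : (['_', '_'] : List Char).isPrefixOf ('_' :: '_' :: t2) = true := by
            simp [List.isPrefixOf]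
          simp only [hpre, if_pos]
          norm_num
          rw [ih t2 ('_' :: acc) (by simp at h ⊢; omega)]
          simp [repDD]
        · have hpre : (['_', '_'] : List Char).isPrefixOf (c :: b :: t2) = false := by
            simp [List.isPrefixOf]
            intro h1 h2
            exact hc ⟨h1.symm, h2.symm⟩
          simp only [hpre, Bool.false_eq_true, if_false]
          rw [ih (b :: t2) (c :: acc) (by simp at h ⊢; omega)]
          simp [repDD, hc]

theorem replace_dd (s : List Char) :
    PySem.Chars.replace s ['_', '_'] ['_'] = repDD s := by
  rw [PySem.Chars.replace]
  simp only [List.isEmpty_cons, Bool.false_eq_true, if_false]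
  exact go_dd s.length s [] le_rfl

theorem repDD_length_le (s : List Char) : (repDD s).length ≤ s.length := by
  fun_induction repDD s with
  | case1 => simp
  | case2 => simp
  | case3 a b t h ih => simp; omega
  | case4 a b t h ih => simpa using ih

theorem repDD_length_lt (s : List Char) (h : PySem.Chars.isIn ['_', '_'] s = true) :
    (repDD s).length < s.length := by
  rw [PySem.Chars.isIn_iff_infix] at h
  fun_induction repDD s with
  | case1 => simp at h
  | case2 c =>
    exfalso
    have := h.length_le
    simp at this
  | case3 a b t hab ih =>
    have := repDD_length_le t
    simp
    omega
  | case4 a b t hab ih =>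
    have hbt : ['_', '_'] <:+: b :: t := by
      rcases List.infix_cons_iff.1 h with hp | hi
      · exfalso
        rcases hp with ⟨r, hr⟩
        simp at hr
        exact hab ⟨hr.1.symm, hr.2.1.symm⟩
      · exact hi
    have := ih hbt
    simpa using this

theorem replace_dd_len (s : List Char) (h : PySem.Chars.isIn ['_', '_'] s = true) :
    (PySem.Chars.replace s ['_', '_'] ['_']).length < s.length := by
  rw [replace_dd]; exact repDD_length_lt s h

def collapseLoop (s : List Char) : List Char :=
  if h : PySem.Chars.isIn ['_', '_'] s = true then
    collapseLoop (PySem.Chars.replace s ['_', '_'] ['_'])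
  else s
termination_by s.length
decreasing_by exact replace_dd_len s h

def norm_type_py (raw : Option String) : String :=
  match raw with
  | none => ""
  | some r =>
    if r.toList = [] then ""              -- `if not raw: return ""`
    else
      -- s = raw.strip().lower()
      let s0 := PySem.Chars.lower (PySem.Chars.strip r.toList)
      -- for ch in (".", "-", " ", "/"): s = s.replace(ch, "_")
      let s1 := List.foldl (fun s ch => PySem.Chars.replace s [ch] ['_']) s0 ['.', '-', ' ', '/']
      -- while "__" in s: s = s.replace("__", "_")   then   return s.strip("_")
      String.ofList (PySem.Chars.stripChars (collapseLoop s1) ['_'])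

-- ===== PORT B =====
def sepB : List Char := ['.', '-', ' ', '/', '_']

def norm_type_py_alt (raw : Option String) : String :=
  match raw with
  | none => ""
  | some r =>
    if r.toList = [] then ""              -- `if not raw: return ""`
    else
      let cs := PySem.Chars.lower (PySem.Chars.strip r.toList)
      -- for ch in s: accumulate (parts, cur)
      let st := cs.foldl (fun (st : List (List Char) × List Char) ch =>
          if sepB.contains ch then
            (if st.2 ≠ [] then (st.1 ++ [st.2], ([] : List Char)) else st)
          else (st.1, st.2 ++ [ch])) ([], [])
      -- if cur: parts.append("".join(cur))
      let parts := if st.2 ≠ [] then st.1 ++ [st.2] else st.1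
      -- "_".join(parts)
      String.ofList (PySem.Chars.join ['_'] parts)

-- ===== PRECONDITION & SPEC =====
def Spec_norm_type_py (raw : Option String) (out : String) : Prop := out = norm_type_py_alt raw
instance (raw : Option String) (out : String) : Decidable (Spec_norm_type_py raw out) := by unfold Spec_norm_type_py; infer_instance

-- ===== CLAIM (what is proved, stated in full; the proofs are below) =====
def Claim_equal_norm_type_py : Prop := ∀ (raw : Option String), Dom_norm_type_py raw → Spec_norm_type_py raw (norm_type_py raw)

-- ===== LEMMAS AND PROOFS =====
theorem go_single (c d : Char) (fuel : Nat) (l acc : List Char) (h : l.length ≤ fuel) :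
    PySem.Chars.replace.go [c] [d] fuel l acc
      = acc.reverse ++ l.map (fun x => if x = c then d else x) := by
  induction fuel generalizing l acc with
  | zero =>
    cases l with
    | nil => rw [PySem.Chars.replace.go]; simp
    | cons x t => simp at h
  | succ f ih =>
    cases l with
    | nil =>
      rw [PySem.Chars.replace.go]
      · simp
      · omega
    | cons x t =>
      rw [PySem.Chars.replace.go]
      by_cases hx : x = c
      · subst hx
        have hpre : ([x] : List Char).isPrefixOf (x :: t) = true := by
          simp [List.isPrefixOf]
        simp only [hpre, if_pos]
        norm_num
        rw [ih t (d :: acc) (by simp at h ⊢; omega)]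
        simp
      · have hpre : ([c] : List Char).isPrefixOf (x :: t) = false := by
          simp [List.isPrefixOf]
          exact fun hh => hx hh.symm
        simp only [hpre, Bool.false_eq_true, if_false]
        rw [ih t (x :: acc) (by simp at h ⊢; omega)]
        simp [hx]

theorem replace_single (s : List Char) (c d : Char) :
    PySem.Chars.replace s [c] [d] = s.map (fun x => if x = c then d else x) := by
  rw [PySem.Chars.replace]
  simp only [List.isEmpty_cons, Bool.false_eq_true, if_false]
  exact go_single c d s.length s [] le_rfl

def uA (c : Char) : Char := if c = '.' ∨ c = '-' ∨ c = ' ' ∨ c = '/' then '_' else c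

theorem foldl_replace_eq_map (s0 : List Char) :
    List.foldl (fun s ch => PySem.Chars.replace s [ch] ['_']) s0 ['.', '-', ' ', '/']
      = s0.map uA := by
  simp only [List.foldl_cons, List.foldl_nil, replace_single, List.map_map]
  congr 1
  funext c
  simp only [Function.comp]
  by_cases h1 : c = '.' <;> by_cases h2 : c = '-' <;> by_cases h3 : c = ' ' <;>
    by_cases h4 : c = '/' <;> simp_all [uA]

def und (c : Char) : Bool := c == '_'

def squeeze : List Char → List Char
  | [] => []
  | [c] => [c]
  | a :: b :: t => if a = '_' ∧ b = '_' then squeeze (b :: t) else a :: squeeze (b :: t)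

theorem squeeze_cons_of_ne (c : Char) (t : List Char) (h : ¬ c = '_') :
    squeeze (c :: t) = c :: squeeze t := by
  cases t with
  | nil => simp [squeeze]
  | cons b t2 => simp [squeeze, h]

theorem squeeze_cons_und (r : List Char) :
    squeeze ('_' :: r) = '_' :: squeeze (r.dropWhile und) := by
  induction r with
  | nil => simp [squeeze]
  | cons c t ih =>
    by_cases hc : c = '_'
    · subst hc
      rw [show squeeze ('_' :: '_' :: t) = squeeze ('_' :: t) by simp [squeeze]]
      rw [ih]
      simp [List.dropWhile_cons, und]
    · rw [show squeeze ('_' :: c :: t) = '_' :: squeeze (c :: t) by simp [squeeze, hc]]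
      simp [List.dropWhile_cons, und, hc]

theorem squeeze_append_nonund (pre rest : List Char) (h : ∀ x ∈ pre, und x = false) :
    squeeze (pre ++ rest) = pre ++ squeeze rest := by
  induction pre with
  | nil => simp
  | cons c p ih =>
    have hc : ¬ c = '_' := by
      have := h c (by simp)
      simp [und] at this; exact this
    simp only [List.cons_append]
    rw [squeeze_cons_of_ne _ _ hc, ih (fun x hx => h x (by simp [hx]))]

theorem sq_rep_aux : ∀ n, ∀ t : List Char, t.length ≤ n →
    (squeeze (repDD t) = squeeze t ∧ squeeze ('_' :: repDD t) = squeeze ('_' :: t)) := by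
  intro n
  induction n with
  | zero =>
    intro t ht
    have : t = [] := List.eq_nil_of_length_eq_zero (Nat.le_zero.1 ht)
    subst this; exact ⟨rfl, rfl⟩
  | succ n ih =>
    intro t ht
    constructor
    · -- Q t
      match t with
      | [] => rfl
      | [c] => rfl
      | a :: b :: t2 =>
        by_cases hab : a = '_' ∧ b = '_'
        · obtain ⟨rfl, rfl⟩ := hab
          rw [show repDD ('_' :: '_' :: t2) = '_' :: repDD t2 by simp [repDD]]
          rw [show squeeze ('_' :: '_' :: t2) = squeeze ('_' :: t2) by simp [squeeze]]
          exact (ih t2 (by simp at ht; omega)).2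
        · rw [show repDD (a :: b :: t2) = a :: repDD (b :: t2) by simp [repDD, hab]]
          by_cases ha : a = '_'
          · subst ha
            have hb : ¬ b = '_' := fun hb => hab ⟨rfl, hb⟩
            rw [show squeeze ('_' :: b :: t2) = '_' :: squeeze (b :: t2) by simp [squeeze, hb]]
            have hR := (ih (b :: t2) (by simp at ht ⊢; omega)).2
            rw [hR]
            simp [squeeze, hb]
          · rw [squeeze_cons_of_ne _ _ ha, squeeze_cons_of_ne _ _ ha]
            exact congrArg (a :: ·) (ih (b :: t2) (by simp at ht ⊢; omega)).1
    · -- R t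
      match t with
      | [] => rfl
      | [c] => rfl
      | a :: b :: t2 =>
        by_cases hab : a = '_' ∧ b = '_'
        · obtain ⟨rfl, rfl⟩ := hab
          rw [show repDD ('_' :: '_' :: t2) = '_' :: repDD t2 by simp [repDD]]
          rw [show squeeze ('_' :: '_' :: repDD t2) = squeeze ('_' :: repDD t2) by simp [squeeze]]
          rw [(ih t2 (by simp at ht; omega)).2]
          rw [show squeeze ('_' :: '_' :: '_' :: t2) = squeeze ('_' :: '_' :: t2) by simp [squeeze]]
          rw [show squeeze ('_' :: '_' :: t2) = squeeze ('_' :: t2) by simp [squeeze]]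
        · rw [show repDD (a :: b :: t2) = a :: repDD (b :: t2) by simp [repDD, hab]]
          by_cases ha : a = '_'
          · subst ha
            rw [show squeeze ('_' :: '_' :: repDD (b :: t2)) = squeeze ('_' :: repDD (b :: t2)) by simp [squeeze]]
            rw [(ih (b :: t2) (by simp at ht ⊢; omega)).2]
            rw [show squeeze ('_' :: '_' :: b :: t2) = squeeze ('_' :: b :: t2) by simp [squeeze]]
          · rw [show squeeze ('_' :: a :: repDD (b :: t2)) = '_' :: squeeze (a :: repDD (b :: t2)) by simp [squeeze, ha]]
            rw [show squeeze ('_' :: a :: b :: t2) = '_' :: squeeze (a :: b :: t2) by simp [squeeze, ha]]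
            rw [squeeze_cons_of_ne _ _ ha, squeeze_cons_of_ne _ _ ha]
            exact congrArg (fun x => '_' :: a :: x) (ih (b :: t2) (by simp at ht ⊢; omega)).1

theorem squeeze_repDD (s : List Char) : squeeze (repDD s) = squeeze s :=
  (sq_rep_aux s.length s le_rfl).1

theorem squeeze_of_no_dd (s : List Char) (h : PySem.Chars.isIn ['_', '_'] s = false) :
    squeeze s = s := by
  rw [PySem.Chars.isIn_eq_false_iff] at h
  induction s with
  | nil => rfl
  | cons a t ih =>
    have ht : ¬ (['_', '_'] : List Char) <:+: t := fun hi => h (hi.trans (List.suffix_cons a t).isInfix)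
    cases t with
    | nil => rfl
    | cons b t2 =>
      have hab : ¬ (a = '_' ∧ b = '_') := by
        rintro ⟨rfl, rfl⟩
        exact h ⟨[], t2, rfl⟩
      rw [show squeeze (a :: b :: t2) = a :: squeeze (b :: t2) by simp [squeeze, hab]]
      rw [ih ht]

theorem collapseLoop_eq_squeeze : ∀ n, ∀ s : List Char, s.length ≤ n →
    collapseLoop s = squeeze s := by
  intro n
  induction n with
  | zero =>
    intro s hs
    have : s = [] := List.eq_nil_of_length_eq_zero (Nat.le_zero.1 hs)
    subst this
    rw [collapseLoop, dif_neg (by decide : ¬ PySem.Chars.isIn ['_', '_'] ([] : List Char) = true)]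
    rfl
  | succ n ih =>
    intro s hs
    rw [collapseLoop]
    by_cases h : PySem.Chars.isIn ['_', '_'] s = true
    · rw [dif_pos h, replace_dd]
      have hlt := repDD_length_lt s h
      rw [ih (repDD s) (by omega)]
      exact squeeze_repDD s
    · rw [dif_neg h]
      exact (squeeze_of_no_dd s (by simpa using h)).symm

def runsP (p : Char → Bool) : List Char → List Char → List (List Char)
  | cur, [] => if cur = [] then [] else [cur]
  | cur, c :: cs =>
    if p c then (if cur = [] then runsP p [] cs else cur :: runsP p [] cs)
    else runsP p (cur ++ [c]) cs

theorem foldB_eq_runsP (cs : List Char) : ∀ parts cur,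
    (if (cs.foldl (fun (st : List (List Char) × List Char) ch =>
        if sepB.contains ch then
          (if st.2 ≠ [] then (st.1 ++ [st.2], ([] : List Char)) else st)
        else (st.1, st.2 ++ [ch])) (parts, cur)).2 ≠ [] then
       (cs.foldl (fun (st : List (List Char) × List Char) ch =>
        if sepB.contains ch then
          (if st.2 ≠ [] then (st.1 ++ [st.2], ([] : List Char)) else st)
        else (st.1, st.2 ++ [ch])) (parts, cur)).1 ++
         [(cs.foldl (fun (st : List (List Char) × List Char) ch =>
        if sepB.contains ch then
          (if st.2 ≠ [] then (st.1 ++ [st.2], ([] : List Char)) else st)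
        else (st.1, st.2 ++ [ch])) (parts, cur)).2]
     else (cs.foldl (fun (st : List (List Char) × List Char) ch =>
        if sepB.contains ch then
          (if st.2 ≠ [] then (st.1 ++ [st.2], ([] : List Char)) else st)
        else (st.1, st.2 ++ [ch])) (parts, cur)).1)
      = parts ++ runsP (sepB.contains ·) cur cs := by
  induction cs with
  | nil =>
    intro parts cur
    by_cases h : cur = [] <;> simp [runsP, h]
  | cons c t ih =>
    intro parts cur
    simp only [List.foldl_cons]
    by_cases hc : sepB.contains c = true
    · rw [if_pos hc]
      by_cases hcur : cur = []
      · subst hcur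
        rw [if_neg (show ¬(([] : List Char) ≠ []) by simp), runsP, if_pos hc, if_pos rfl]
        exact ih parts []
      · rw [if_pos (show cur ≠ [] from hcur), runsP, if_pos hc, if_neg hcur, ih (parts ++ [cur]) []]
        simp
    · rw [if_neg hc, runsP, if_neg hc]
      exact ih parts (cur ++ [c])

theorem stripChars_underscore (s : List Char) :
    PySem.Chars.stripChars s ['_'] =
      List.rdropWhile und (List.dropWhile und s) := by
  rw [PySem.Chars.stripChars, List.rdropWhile]
  have hp : (fun c => (['_'] : List Char).contains c) = und := by
    funext c
    by_cases h : c = '_' <;> simp [und, h]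
  rw [hp]

theorem dropWhile_und_squeeze (ms : List Char) :
    List.dropWhile und (squeeze ms) = squeeze (List.dropWhile und ms) := by
  induction ms with
  | nil => rfl
  | cons c t ih =>
    by_cases hc : c = '_'
    · subst hc
      rw [squeeze_cons_und]
      rw [List.dropWhile_cons_of_pos (by simp [und])]
      rw [List.dropWhile_cons_of_pos (by simp [und])]
      cases h : List.dropWhile und t with
      | nil => simp [squeeze]
      | cons d r =>
        have hd : und d = false := by
          have := List.head?_dropWhile_not und t
          rw [h] at this
          simpa using this
        rw [squeeze_cons_of_ne d r (by simpa [und] using hd)]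
        rw [List.dropWhile_cons_of_neg (by simp [hd])]
    · rw [squeeze_cons_of_ne _ _ hc]
      rw [List.dropWhile_cons_of_neg (by simp [und, hc])]
      rw [List.dropWhile_cons_of_neg (by simp [und, hc])]
      rw [squeeze_cons_of_ne _ _ hc]

theorem runsP_dropWhile_und (ms : List Char) :
    runsP und [] (List.dropWhile und ms) = runsP und [] ms := by
  induction ms with
  | nil => rfl
  | cons c t ih =>
    by_cases hc : und c = true
    · rw [List.dropWhile_cons_of_pos hc, ih, runsP, if_pos hc, if_pos rfl]
    · rw [List.dropWhile_cons_of_neg hc]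

theorem runsP_append_nonsep (p : Char → Bool) (tk : List Char) :
    ∀ cur cs, (∀ x ∈ tk, p x = false) →
    runsP p cur (tk ++ cs) = runsP p (cur ++ tk) cs := by
  induction tk with
  | nil => intro cur cs _; simp
  | cons x tk' ih =>
    intro cur cs h
    rw [List.cons_append, runsP, if_neg (by simp [h x (by simp)])]
    rw [ih (cur ++ [x]) cs (fun y hy => h y (by simp [hy]))]
    simp

theorem runsP_ne_nil (p : Char → Bool) : ∀ cs cur, cur ≠ [] → runsP p cur cs ≠ [] := by
  intro cs
  induction cs with
  | nil => intro cur h; rw [runsP, if_neg h]; simp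
  | cons c t ih =>
    intro cur h
    rw [runsP]
    by_cases hc : p c = true
    · rw [if_pos hc, if_neg h]; simp
    · rw [if_neg hc]
      exact ih (cur ++ [c]) (by simp)

theorem join_cons_ne_nil (a : List Char) (ps : List (List Char)) (h : ps ≠ []) :
    PySem.Chars.join ['_'] (a :: ps) = a ++ '_' :: PySem.Chars.join ['_'] ps := by
  cases ps with
  | nil => simp at h
  | cons b t =>
    simp [PySem.Chars.join, List.intercalate, List.intersperse]

theorem rdropWhile_all_false (x : List Char) (h : ∀ a ∈ x, und a = false) :
    List.rdropWhile und x = x := by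
  rw [List.rdropWhile]
  rw [List.dropWhile_eq_self_iff.2 ?_]
  · simp
  · intro hne hp
    have hmem : x.reverse[0] ∈ x := by
      have := List.getElem_mem hne
      exact (List.mem_reverse).1 this
    rw [h _ hmem] at hp
    simp at hp

theorem rdropWhile_append_ne_nil (x y : List Char) (h : List.rdropWhile und y ≠ []) :
    List.rdropWhile und (x ++ y) = x ++ List.rdropWhile und y := by
  rw [List.rdropWhile, List.reverse_append, List.dropWhile_append]
  have h' : List.dropWhile und y.reverse ≠ [] := by
    rw [List.rdropWhile] at h
    intro hh
    simp [hh] at h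
  rw [if_neg (by simpa using h')]
  rw [List.reverse_append, List.reverse_reverse, List.rdropWhile]

theorem und_underscore : und '_' = true := by decide

theorem G_main : ∀ n, ∀ ms : List Char, ms.length ≤ n → List.dropWhile und ms = ms →
    List.rdropWhile und (squeeze ms) = PySem.Chars.join ['_'] (runsP und [] ms) := by
  intro n
  induction n with
  | zero =>
    intro ms hlen _
    have : ms = [] := List.eq_nil_of_length_eq_zero (Nat.le_zero.1 hlen)
    subst this
    simp [squeeze, runsP, PySem.Chars.join, List.intercalate]
  | succ n ih =>
    intro ms hlen hfix
    cases ms with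
    | nil => simp [squeeze, runsP, PySem.Chars.join, List.intercalate]
    | cons c t =>
      have hc : und c = false := by
        by_cases h : und c = true
        · rw [List.dropWhile_cons_of_pos h] at hfix
          have := List.length_dropWhile_le und t
          have := congrArg List.length hfix
          simp at this
          omega
        · simpa using h
      have hc' : ¬ c = '_' := by simpa [und] using hc
      set tk := List.takeWhile (fun x => !und x) t with htk
      set rest := List.dropWhile (fun x => !und x) t with hrest
      have hsplit : t = tk ++ rest := (List.takeWhile_append_dropWhile).symm
      have htknon : ∀ x ∈ c :: tk, und x = false := by
        intro x hx
        rcases List.mem_cons.1 hx with rfl | hx'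
        · exact hc
        · have := List.mem_takeWhile_imp hx'
          simpa using this
      have hsq : squeeze (c :: t) = (c :: tk) ++ squeeze rest := by
        rw [hsplit, ← List.cons_append]
        exact squeeze_append_nonund (c :: tk) rest htknon
      have hruns : runsP und [] (c :: t) = runsP und (c :: tk) rest := by
        rw [hsplit, ← List.cons_append]
        have := runsP_append_nonsep und (c :: tk) [] rest htknon
        simpa using this
      rw [hsq, hruns]
      cases hr : rest with
      | nil =>
        rw [show squeeze [] = [] from rfl, List.append_nil]
        rw [rdropWhile_all_false _ htknon]
        rw [runsP, if_neg (by simp)]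
        simp [PySem.Chars.join, List.intercalate]
      | cons s r =>
        have hs : und s = false → False := by
          intro hsf
          have := List.head?_dropWhile_not (fun x => !und x) t
          rw [← hrest, hr] at this
          simp [hsf] at this
        have hs' : s = '_' := by
          by_cases h : s = '_'
          · exact h
          · exact absurd (by simpa [und] using h) (fun hh => hs hh)
        subst hs'
        rw [squeeze_cons_und]
        set r0 := List.dropWhile und r with hr0
        have hr0fix : List.dropWhile und r0 = r0 := List.dropWhile_idempotent und r
        have hr0len : r0.length ≤ n := by
          have h1 : r0.length ≤ r.length := List.length_dropWhile_le und r
          have h2 : r.length + 1 = rest.length := by rw [hr]; simp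
          have h3 : rest.length ≤ t.length := by
            rw [hrest]; exact List.length_dropWhile_le _ t
          simp at hlen
          omega
        have IH := ih r0 hr0len hr0fix
        have hrunsr : runsP und (c :: tk) ('_' :: r) = (c :: tk) :: runsP und [] r0 := by
          rw [runsP, if_pos und_underscore, if_neg (by simp)]
          rw [hr0, runsP_dropWhile_und]
        rw [hrunsr]
        cases hr0c : r0 with
        | nil =>
          rw [show squeeze [] = [] from rfl]
          rw [show (c :: tk ++ '_' :: ([] : List Char)) = (c :: tk) ++ ['_'] by simp]
          rw [List.rdropWhile_concat_pos und (c :: tk) '_' und_underscore]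
          rw [rdropWhile_all_false _ htknon]
          rw [runsP, if_pos rfl]
          simp [PySem.Chars.join, List.intercalate]
        | cons d r1 =>
          rw [hr0c] at IH
          have hd : und d = false := by
            have := List.head?_dropWhile_not und r
            rw [← hr0, hr0c] at this
            simpa using this
          have hdne : ¬ d = '_' := by simpa [und] using hd
          have hne2 : List.rdropWhile und (squeeze (d :: r1)) ≠ [] := by
            rw [squeeze_cons_of_ne d r1 hdne]
            intro hh
            have := List.rdropWhile_eq_nil_iff.1 hh d (by simp)
            rw [hd] at this; simp at this
          have hne1 : List.rdropWhile und ('_' :: squeeze (d :: r1)) ≠ [] := by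
            rw [show ('_' :: squeeze (d :: r1)) = ['_'] ++ squeeze (d :: r1) from rfl]
            rw [rdropWhile_append_ne_nil _ _ hne2]
            simp
          rw [show (c :: tk ++ '_' :: squeeze (d :: r1)) = (c :: tk) ++ ('_' :: squeeze (d :: r1)) by simp]
          rw [rdropWhile_append_ne_nil _ _ hne1]
          rw [show ('_' :: squeeze (d :: r1)) = ['_'] ++ squeeze (d :: r1) from rfl]
          rw [rdropWhile_append_ne_nil _ _ hne2]
          rw [IH]
          have hpsne : runsP und [] (d :: r1) ≠ [] := by
            rw [runsP, if_neg (by simp [hd])]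
            exact runsP_ne_nil und r1 [d] (by simp)
          rw [join_cons_ne_nil _ _ hpsne]
          simp

theorem contains_eq_und_uA (c : Char) : sepB.contains c = und (uA c) := by
  by_cases h1 : c = '.' <;> by_cases h2 : c = '-' <;> by_cases h3 : c = ' ' <;>
    by_cases h4 : c = '/' <;> by_cases h5 : c = '_' <;>
    simp_all [sepB, uA, und]

theorem uA_id_of_not_sep (c : Char) (h : sepB.contains c = false) : uA c = c := by
  have h' : c ∉ sepB := by simpa using h
  rw [uA, if_neg]
  intro hh
  rcases hh with h1 | h1 | h1 | h1 <;> subst h1 <;> exact h' (by simp [sepB])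

theorem runsP_map : ∀ (cs cur : List Char), List.map uA cur = cur →
    runsP (fun x => sepB.contains x) cur cs = runsP und cur (List.map uA cs) := by
  intro cs
  induction cs with
  | nil => intro cur _; rfl
  | cons c t ih =>
    intro cur hcur
    rw [List.map_cons, runsP, runsP]
    by_cases hc : sepB.contains c = true
    · rw [if_pos hc, if_pos (show und (uA c) = true by rw [← contains_eq_und_uA]; exact hc)]
      by_cases h0 : cur = []
      · rw [if_pos h0, ih [] rfl]
        rw [if_pos h0]
      · rw [if_neg h0, ih [] rfl]
        rw [if_neg h0]
    · have hc' : sepB.contains c = false := by simpa using hc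
      rw [if_neg hc, if_neg (show ¬ und (uA c) = true by rw [← contains_eq_und_uA]; exact hc)]
      rw [uA_id_of_not_sep c hc']
      exact ih (cur ++ [c]) (by simp [hcur, uA_id_of_not_sep c hc'])

theorem pipeline_eq (cs : List Char) :
    PySem.Chars.stripChars
        (collapseLoop (List.foldl (fun s ch => PySem.Chars.replace s [ch] ['_']) cs
          ['.', '-', ' ', '/'])) ['_']
      = PySem.Chars.join ['_']
          (runsP (fun x => sepB.contains x) [] cs) := by
  rw [foldl_replace_eq_map]
  rw [collapseLoop_eq_squeeze (cs.map uA).length _ le_rfl]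
  rw [stripChars_underscore, dropWhile_und_squeeze]
  rw [G_main (List.dropWhile und (cs.map uA)).length _ le_rfl
    (List.dropWhile_idempotent und (cs.map uA))]
  rw [runsP_dropWhile_und]
  rw [runsP_map cs [] rfl]

-- ===== VERDICT (by name: the statement is the Claim_ definition above) =====
theorem norm_type_py_spec : Claim_equal_norm_type_py := by
  intro raw _
  unfold Spec_norm_type_py
  cases raw with
  | none => rfl
  | some r =>
    simp only [norm_type_py, norm_type_py_alt]
    by_cases h : r.toList = []
    · rw [if_pos h, if_pos h]
    · rw [if_neg h, if_neg h]
      congr 1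
      rw [pipeline_eq]
      rw [foldB_eq_runsP (PySem.Chars.lower (PySem.Chars.strip r.toList)) [] []]
      rw [List.nil_append]
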